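-- pv_equiv track=rewrite | github.com/ricbit/advent-of-code | 2016/raw/adv07-2.py | check
-- ===== SOURCE A (Python) =====
-- def check(words, hyper):
--   for w in words:
--     for i in range(len(w) - 2):
--       if w[i] != w[i + 1] and w[i] == w[i + 2]:
--         bab = "".join([w[i + 1], w[i], w[i + 1]])
--         if any(bab in h for h in hyper):
--           return True
--   return False
-- ===== SOURCE B (Python) =====
-- def check(words, hyper):
--   babs = set()
--   for w in words:
--     for i in range(len(w) - 2):
--       if w[i] != w[i + 1] and w[i] == w[i + 2]:
--         babs.add(w[i + 1] + w[i] + w[i + 1])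
--   grams = set()
--   for h in hyper:
--     for i in range(len(h) - 2):
--       grams.add(h[i:i + 3])
--   return bool(babs & grams)
-- ===== Notes on version B (the rewrite author's own statement) =====
-- stated objective: alternative
-- what changed: Instead of A's nested early-return scan that re-searches every hyper string per ABA found, B builds the set of BAB candidates from words and the set of all length-3 substrings of hyper in two independent passes and returns whether the two sets intersect.
import Mathlib
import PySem

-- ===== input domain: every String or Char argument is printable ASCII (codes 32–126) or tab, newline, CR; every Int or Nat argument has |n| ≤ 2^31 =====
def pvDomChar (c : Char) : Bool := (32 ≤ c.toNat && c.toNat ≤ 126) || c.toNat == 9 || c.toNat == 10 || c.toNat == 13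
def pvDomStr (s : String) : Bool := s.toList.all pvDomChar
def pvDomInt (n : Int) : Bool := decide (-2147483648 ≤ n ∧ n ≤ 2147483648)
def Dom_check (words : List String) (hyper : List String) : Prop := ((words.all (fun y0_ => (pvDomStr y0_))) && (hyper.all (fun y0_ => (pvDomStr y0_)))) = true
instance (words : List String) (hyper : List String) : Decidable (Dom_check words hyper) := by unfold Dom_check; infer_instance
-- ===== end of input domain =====

-- B replaces A's nested early-return scan (re-searching hyper per ABA) by building the set of
-- BAB candidates and the set of hyper trigrams in two passes and intersecting them (alternative).


-- ===== PORT A =====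
-- early 'return True' over the nested loops = List.any; indices from range(len(w)-2) are in
-- bounds, so xs[i] is ported with pyGetD (exact on those indices)
def check (words : List String) (hyper : List String) : Bool :=
  words.any (fun w =>
    let cs := w.toList
    (PySem.List.pyRange 0 ((cs.length : Int) - 2) 1).any (fun i =>
      let a := PySem.List.pyGetD cs i ' '
      let b := PySem.List.pyGetD cs (i + 1) ' '
      let c := PySem.List.pyGetD cs (i + 2) ' '
      if a ≠ b ∧ a = c then
        hyper.any (fun h => PySem.Chars.isIn [b, a, b] h.toList)
      else false))

-- ===== PORT B =====
def babsOf (words : List String) : PySem.Set (List Char) :=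
  words.foldl (fun s w =>
    let cs := w.toList
    (PySem.List.pyRange 0 ((cs.length : Int) - 2) 1).foldl (fun s i =>
      let a := PySem.List.pyGetD cs i ' '
      let b := PySem.List.pyGetD cs (i + 1) ' '
      let c := PySem.List.pyGetD cs (i + 2) ' '
      if a ≠ b ∧ a = c then PySem.Set.add s [b, a, b] else s) s) PySem.Set.empty

def gramsOf (hyper : List String) : PySem.Set (List Char) :=
  hyper.foldl (fun s h =>
    let cs := h.toList
    (PySem.List.pyRange 0 ((cs.length : Int) - 2) 1).foldl (fun s i =>
      PySem.Set.add s (PySem.List.slice cs (some i) (some (i + 3)))) s) PySem.Set.empty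

def check_alt (words : List String) (hyper : List String) : Bool :=
  !(PySem.Set.inter (babsOf words) (gramsOf hyper)).isEmpty

-- ===== PRECONDITION & SPEC =====
def Spec_check (words : List String) (hyper : List String) (out : Bool) : Prop := out = check_alt words hyper
instance (words : List String) (hyper : List String) (out : Bool) : Decidable (Spec_check words hyper out) := by unfold Spec_check; infer_instance

-- ===== CLAIM (what is proved, stated in full; the proofs are below) =====
def Claim_equal_check : Prop := ∀ (words : List String) (hyper : List String), Dom_check words hyper → Spec_check words hyper (check words hyper)

-- ===== LEMMAS AND PROOFS =====

-- generic membership through a set-accumulating foldl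
theorem mem_foldl_sets {α β : Type} [BEq β] [LawfulBEq β]
    (f : PySem.Set β → α → PySem.Set β) (P : α → β → Prop)
    (hf : ∀ s x y, y ∈ f s x ↔ y ∈ s ∨ P x y) :
    ∀ (l : List α) (s : PySem.Set β) (y : β),
      y ∈ l.foldl f s ↔ y ∈ s ∨ ∃ x ∈ l, P x y := by
  intro l
  induction l with
  | nil => simp
  | cons x xs ih =>
      intro s y
      simp only [List.foldl_cons, ih, hf, List.mem_cons]
      constructor
      · rintro ((h | h) | ⟨z, hz, hP⟩)
        · exact Or.inl h
        · exact Or.inr ⟨x, Or.inl rfl, h⟩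
        · exact Or.inr ⟨z, Or.inr hz, hP⟩
      · rintro (h | ⟨z, (rfl | hz), hP⟩)
        · exact Or.inl (Or.inl h)
        · exact Or.inl (Or.inr hP)
        · exact Or.inr ⟨z, hz, hP⟩

theorem mem_babsOf (words : List String) (t : List Char) :
    t ∈ babsOf words ↔
      ∃ w ∈ words, ∃ i ∈ PySem.List.pyRange 0 ((w.toList.length : Int) - 2) 1,
        (PySem.List.pyGetD w.toList i ' ' ≠ PySem.List.pyGetD w.toList (i + 1) ' ' ∧
         PySem.List.pyGetD w.toList i ' ' = PySem.List.pyGetD w.toList (i + 2) ' ') ∧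
        t = [PySem.List.pyGetD w.toList (i + 1) ' ', PySem.List.pyGetD w.toList i ' ',
             PySem.List.pyGetD w.toList (i + 1) ' '] := by
  unfold babsOf
  rw [mem_foldl_sets _
      (fun w t => ∃ i ∈ PySem.List.pyRange 0 ((w.toList.length : Int) - 2) 1,
        (PySem.List.pyGetD w.toList i ' ' ≠ PySem.List.pyGetD w.toList (i + 1) ' ' ∧
         PySem.List.pyGetD w.toList i ' ' = PySem.List.pyGetD w.toList (i + 2) ' ') ∧
        t = [PySem.List.pyGetD w.toList (i + 1) ' ', PySem.List.pyGetD w.toList i ' ',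
             PySem.List.pyGetD w.toList (i + 1) ' '])]
  · simp [PySem.Set.empty]
  · intro s w y
    rw [mem_foldl_sets _
        (fun i t =>
          (PySem.List.pyGetD w.toList i ' ' ≠ PySem.List.pyGetD w.toList (i + 1) ' ' ∧
           PySem.List.pyGetD w.toList i ' ' = PySem.List.pyGetD w.toList (i + 2) ' ') ∧
          t = [PySem.List.pyGetD w.toList (i + 1) ' ', PySem.List.pyGetD w.toList i ' ',
               PySem.List.pyGetD w.toList (i + 1) ' '])]
    intro s i y
    by_cases hc : PySem.List.pyGetD w.toList i ' ' ≠ PySem.List.pyGetD w.toList (i + 1) ' ' ∧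
        PySem.List.pyGetD w.toList i ' ' = PySem.List.pyGetD w.toList (i + 2) ' '
    · rw [if_pos hc]
      simp only [PySem.Set.mem_add]
      tauto
    · rw [if_neg hc]
      tauto

theorem mem_gramsOf (hyper : List String) (t : List Char) :
    t ∈ gramsOf hyper ↔
      ∃ h ∈ hyper, ∃ i ∈ PySem.List.pyRange 0 ((h.toList.length : Int) - 2) 1,
        t = PySem.List.slice h.toList (some i) (some (i + 3)) := by
  unfold gramsOf
  rw [mem_foldl_sets _
      (fun h t => ∃ i ∈ PySem.List.pyRange 0 ((h.toList.length : Int) - 2) 1,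
        t = PySem.List.slice h.toList (some i) (some (i + 3)))]
  · simp [PySem.Set.empty]
  · intro s h y
    rw [mem_foldl_sets _
        (fun i t => t = PySem.List.slice h.toList (some i) (some (i + 3)))]
    intro s i y
    simp [PySem.Set.mem_add]

-- a length-3 list is a substring of cs iff it is one of cs's trigram slices
theorem isIn_three_iff (sub cs : List Char) (hlen : sub.length = 3) :
    PySem.Chars.isIn sub cs = true ↔
      ∃ i ∈ PySem.List.pyRange 0 ((cs.length : Int) - 2) 1,
        sub = PySem.List.slice cs (some i) (some (i + 3)) := by
  rw [← PySem.Chars.exists_prefix_drop_iff_isIn]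
  constructor
  · rintro ⟨j, hpre⟩
    have hle : sub.length ≤ (cs.drop j).length := hpre.length_le
    have hdl : (cs.drop j).length = cs.length - j := List.length_drop ..
    have hj : j + 3 ≤ cs.length := by omega
    refine ⟨(j : Int), ?_, ?_⟩
    · rw [PySem.List.mem_pyRange_one]
      constructor
      · exact Int.natCast_nonneg j
      · omega
    · have : PySem.List.slice cs (some (j : Int)) (some ((j : Int) + 3)) = (cs.drop j).take 3 := by
        rw [PySem.List.slice_toNat _ (Int.natCast_nonneg j) (by positivity)]
        congr 1
        · omega
      rw [this]
      have := List.prefix_iff_eq_take.mp hpre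
      rw [← hlen]; exact this
  · rintro ⟨i, hi, hslice⟩
    rw [PySem.List.mem_pyRange_one] at hi
    obtain ⟨hi0, hi2⟩ := hi
    refine ⟨i.toNat, ?_⟩
    have : PySem.List.slice cs (some i) (some (i + 3)) = (cs.drop i.toNat).take 3 := by
      rw [PySem.List.slice_toNat _ hi0 (by omega)]
      congr 1
      omega
    rw [hslice, this]
    exact List.take_prefix _ _

theorem check_eq_true_iff (words hyper : List String) :
    check words hyper = true ↔
      ∃ w ∈ words, ∃ i ∈ PySem.List.pyRange 0 ((w.toList.length : Int) - 2) 1,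
        (PySem.List.pyGetD w.toList i ' ' ≠ PySem.List.pyGetD w.toList (i + 1) ' ' ∧
         PySem.List.pyGetD w.toList i ' ' = PySem.List.pyGetD w.toList (i + 2) ' ') ∧
        ∃ h ∈ hyper,
          PySem.Chars.isIn [PySem.List.pyGetD w.toList (i + 1) ' ',
            PySem.List.pyGetD w.toList i ' ', PySem.List.pyGetD w.toList (i + 1) ' ']
            h.toList = true := by
  unfold check
  simp only [List.any_eq_true]
  constructor
  · rintro ⟨w, hw, i, hi, hcond⟩
    by_cases hc : PySem.List.pyGetD w.toList i ' ' ≠ PySem.List.pyGetD w.toList (i + 1) ' ' ∧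
        PySem.List.pyGetD w.toList i ' ' = PySem.List.pyGetD w.toList (i + 2) ' '
    · rw [if_pos hc, List.any_eq_true] at hcond
      exact ⟨w, hw, i, hi, hc, hcond⟩
    · rw [if_neg hc] at hcond
      exact absurd hcond (by simp)
  · rintro ⟨w, hw, i, hi, hc, h, hh, hin⟩
    refine ⟨w, hw, i, hi, ?_⟩
    rw [if_pos hc, List.any_eq_true]
    exact ⟨h, hh, hin⟩

theorem check_alt_eq_true_iff (words hyper : List String) :
    check_alt words hyper = true ↔
      ∃ t, t ∈ babsOf words ∧ t ∈ gramsOf hyper := by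
  unfold check_alt
  rw [Bool.not_eq_eq_eq_not, Bool.not_true, List.isEmpty_eq_false_iff_exists_mem]
  constructor
  · rintro ⟨t, ht⟩
    exact ⟨t, (PySem.Set.mem_inter ..).mp ht⟩
  · rintro ⟨t, ht⟩
    exact ⟨t, (PySem.Set.mem_inter ..).mpr ht⟩

-- ===== VERDICT (by name: the statement is the Claim_ definition above) =====
theorem check_spec : Claim_equal_check := by
  intro words hyper _
  unfold Spec_check
  rw [Bool.eq_iff_iff, check_eq_true_iff, check_alt_eq_true_iff]
  constructor
  · rintro ⟨w, hw, i, hi, hc, h, hh, hin⟩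
    refine ⟨_, (mem_babsOf words _).mpr ⟨w, hw, i, hi, hc, rfl⟩, ?_⟩
    rw [mem_gramsOf]
    obtain ⟨j, hj, hslice⟩ := (isIn_three_iff _ _ (by simp)).mp hin
    exact ⟨h, hh, j, hj, hslice⟩
  · rintro ⟨t, hb, hg⟩
    obtain ⟨w, hw, i, hi, hc, rfl⟩ := (mem_babsOf words t).mp hb
    obtain ⟨h, hh, j, hj, hslice⟩ := (mem_gramsOf hyper _).mp hg
    exact ⟨w, hw, i, hi, hc, h, hh,
      (isIn_three_iff _ _ (by simp)).mpr ⟨j, hj, hslice⟩⟩
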